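-- pv_equiv track=rewrite | github.com/dpowellm/stratum-lab | stratum_lab/feedback/exporter.py | _find_best_trace
-- ===== SOURCE A (Python) =====
-- from typing import Any, Dict, List
--
-- def _find_best_trace(failure_mode: Dict, error_traces: List[Dict]) -> Dict | None:
--     """Find the best matching error_propagation trace for a failure mode."""
--     if not error_traces:
--         return None
--
--     # Try to match by finding_id
--     fid = failure_mode.get("finding_id", "")
--     for trace in error_traces:
--         if trace.get("finding_id") == fid:
--             return trace
--
--     # Return first trace with actual content
--     for trace in error_traces:
--         if trace.get("error_source_node") or trace.get("origin_node"):
--             return trace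
--
--     return error_traces[0] if error_traces else None
-- ===== SOURCE B (Python) =====
-- def _find_best_trace(failure_mode, error_traces):
--     """Find the best matching error_propagation trace for a failure mode."""
--     if not error_traces:
--         return None
--     fid = failure_mode.get("finding_id", "")
--
--     def _rank(trace):
--         if trace.get("finding_id") == fid:
--             return 0
--         if trace.get("error_source_node") or trace.get("origin_node"):
--             return 1
--         return 2
--
--     # min is stable: it returns the first trace of lowest rank, which is exactly
--     # the fid match / first content-bearing trace / first trace priority order.
--     return min(error_traces, key=_rank)
-- ===== Notes on version B (the rewrite author's own statement) =====
-- stated objective: alternative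
-- what changed: Replaces A's staged scans (fid-match pass, then content pass, then fallback to the first trace) with a priority-scoring selection: each trace gets a rank 0/1/2 and the stable min over ranks picks the answer in one expression.
import Mathlib
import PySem

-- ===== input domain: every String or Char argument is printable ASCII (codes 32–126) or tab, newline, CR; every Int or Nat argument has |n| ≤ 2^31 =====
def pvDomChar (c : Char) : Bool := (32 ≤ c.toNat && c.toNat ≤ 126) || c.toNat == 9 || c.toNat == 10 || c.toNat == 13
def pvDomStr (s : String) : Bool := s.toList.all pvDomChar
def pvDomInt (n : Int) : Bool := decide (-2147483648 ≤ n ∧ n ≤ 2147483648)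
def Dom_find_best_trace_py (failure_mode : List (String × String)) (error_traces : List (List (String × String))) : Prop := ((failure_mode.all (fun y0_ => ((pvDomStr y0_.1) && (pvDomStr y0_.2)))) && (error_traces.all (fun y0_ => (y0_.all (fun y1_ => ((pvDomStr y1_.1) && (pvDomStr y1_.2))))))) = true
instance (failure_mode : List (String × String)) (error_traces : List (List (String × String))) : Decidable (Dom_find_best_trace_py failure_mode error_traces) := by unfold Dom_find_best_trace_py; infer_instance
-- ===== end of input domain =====

-- B replaces A's staged scans with a rank-0/1/2 scoring of each trace and a stable
-- min-by-rank selection; same return value, objective: alternative decomposition.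

-- ===== PORT A =====
-- trace.get("error_source_node") or trace.get("origin_node") — Python truthiness of an
-- optional string value: key present with a nonempty value.
def pvHasContent (trace : List (String × String)) : Bool :=
  (PySem.Dict.getD ⟨trace⟩ "error_source_node" "" != "") ||
  (PySem.Dict.getD ⟨trace⟩ "origin_node" "" != "")

-- first loop of A: return the first trace whose get("finding_id") equals fid
def pvLoopFid (fid : String) : List (List (String × String)) → Option (List (String × String))
  | [] => none
  | t :: rest =>
    if PySem.Dict.get? (⟨t⟩ : PySem.Dict String String) "finding_id" == some fid then some t
    else pvLoopFid fid rest

-- second loop of A: return the first trace with actual content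
def pvLoopContent : List (List (String × String)) → Option (List (String × String))
  | [] => none
  | t :: rest => if pvHasContent t then some t else pvLoopContent rest

def find_best_trace_py (failure_mode : List (String × String)) (error_traces : List (List (String × String))) : Option (List (String × String)) :=
  if error_traces.isEmpty then none
  else
    let fid := PySem.Dict.getD ⟨failure_mode⟩ "finding_id" ""
    match pvLoopFid fid error_traces with
    | some t => some t
    | none =>
      match pvLoopContent error_traces with
      | some t => some t
      | none => if error_traces.isEmpty then none else error_traces.head?

-- ===== PORT B =====
-- _rank(trace): 0 for a fid match, 1 for a content-bearing trace, 2 otherwise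
def pvContentB (trace : List (String × String)) : Bool :=
  (PySem.Dict.getD ⟨trace⟩ "error_source_node" "" != "") ||
  (PySem.Dict.getD ⟨trace⟩ "origin_node" "" != "")

def pvRank (fid : String) (trace : List (String × String)) : Int :=
  if PySem.Dict.get? (⟨trace⟩ : PySem.Dict String String) "finding_id" == some fid then 0
  else if pvContentB trace then 1
  else 2

-- min(error_traces, key=_rank): PySem.List.min? is Python's stable first-minimum
def find_best_trace_py_alt (failure_mode : List (String × String)) (error_traces : List (List (String × String))) : Option (List (String × String)) :=
  if error_traces.isEmpty then none
  else
    let fid := PySem.Dict.getD ⟨failure_mode⟩ "finding_id" ""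
    PySem.List.min? error_traces (pvRank fid)

-- ===== PRECONDITION & SPEC =====
def Spec_find_best_trace_py (failure_mode : List (String × String)) (error_traces : List (List (String × String))) (out : Option (List (String × String))) : Prop := out = find_best_trace_py_alt failure_mode error_traces
instance (failure_mode : List (String × String)) (error_traces : List (List (String × String))) (out : Option (List (String × String))) : Decidable (Spec_find_best_trace_py failure_mode error_traces out) := by unfold Spec_find_best_trace_py; infer_instance

-- ===== CLAIM =====
def Claim_equal_find_best_trace_py : Prop := ∀ (failure_mode : List (String × String)) (error_traces : List (List (String × String))), Dom_find_best_trace_py failure_mode error_traces → Spec_find_best_trace_py failure_mode error_traces (find_best_trace_py failure_mode error_traces)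

-- ===== LEMMAS AND PROOFS =====

-- A's content test and B's are the same boolean
theorem pvContent_eq (t : List (String × String)) : pvHasContent t = pvContentB t := rfl

-- the folding step of min? (named, to state the fold invariant)
def pvStep (fid : String) : Option (List (String × String)) → List (String × String) → Option (List (String × String)) :=
  fun acc x =>
    match acc with
    | none => some x
    | some m => if pvRank fid x < pvRank fid m then some x else some m

theorem pvMin_eq_foldl_step (fid : String) (xs : List (List (String × String))) :
    PySem.List.min? xs (pvRank fid) = List.foldl (pvStep fid) none xs := by
  unfold PySem.List.min? pvStep
  congr 1
  funext acc x
  cases acc <;> rfl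

-- The min?-fold run from accumulator `some m` = first fid match of the rest unless m
-- already matches, else m if it has content, else the first content trace, else m.
theorem pvMinFold_eq (fid : String) (rest : List (List (String × String)))
    (m : List (String × String)) :
    List.foldl (pvStep fid) (some m) rest =
      if pvRank fid m = 0 then some m
      else
        match pvLoopFid fid rest with
        | some t => some t
        | none =>
          if pvRank fid m = 1 then some m
          else
            match pvLoopContent rest with
            | some t => some t
            | none => some m := by
  induction rest generalizing m with
  | nil => by_cases h0 : pvRank fid m = 0 <;> by_cases h1 : pvRank fid m = 1 <;>
      simp [pvLoopFid, pvLoopContent, h0, h1]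
  | cons x rest ih =>
    have hm : pvRank fid m = 0 ∨ pvRank fid m = 1 ∨ pvRank fid m = 2 := by
      unfold pvRank; split_ifs <;> simp
    by_cases hf : (PySem.Dict.get? (⟨x⟩ : PySem.Dict String String) "finding_id"
        == some fid) = true
    · have hx : pvRank fid x = 0 := by simp [pvRank, hf]
      rcases hm with hm | hm | hm <;>
        simp [List.foldl_cons, pvStep, pvLoopFid, hf, hm, hx, ih]
    · by_cases hc : pvContentB x = true
      · have hx : pvRank fid x = 1 := by simp [pvRank, hf, hc]
        rcases hm with hm | hm | hm <;>
          simp [List.foldl_cons, pvStep, pvLoopFid, pvLoopContent, pvContent_eq, hf, hc, hm, hx, ih]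
      · have hx : pvRank fid x = 2 := by simp [pvRank, hf, hc]
        rcases hm with hm | hm | hm <;>
          simp [List.foldl_cons, pvStep, pvLoopFid, pvLoopContent, pvContent_eq, hf, hc, hm, hx, ih]

-- ===== VERDICT =====
theorem find_best_trace_py_spec : Claim_equal_find_best_trace_py := by
  intro fm ets _
  show find_best_trace_py fm ets = find_best_trace_py_alt fm ets
  unfold find_best_trace_py find_best_trace_py_alt
  cases ets with
  | nil => simp
  | cons t rest =>
    simp only [List.isEmpty_cons, Bool.false_eq_true, if_false, pvMin_eq_foldl_step,
      List.foldl_cons]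
    have hseed : pvStep (PySem.Dict.getD (⟨fm⟩ : PySem.Dict String String) "finding_id" "") none t = some t := rfl
    rw [hseed, pvMinFold_eq]
    by_cases hf : (PySem.Dict.get? (⟨t⟩ : PySem.Dict String String) "finding_id"
        == some (PySem.Dict.getD (⟨fm⟩ : PySem.Dict String String) "finding_id" "")) = true
    · have ht : pvRank (PySem.Dict.getD (⟨fm⟩ : PySem.Dict String String) "finding_id" "") t = 0 := by
        simp [pvRank, hf]
      simp [pvLoopFid, hf, ht]
    · by_cases hc : pvContentB t = true
      · have ht : pvRank (PySem.Dict.getD (⟨fm⟩ : PySem.Dict String String) "finding_id" "") t = 1 := by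
          simp [pvRank, hf, hc]
        cases h1 : pvLoopFid (PySem.Dict.getD (⟨fm⟩ : PySem.Dict String String) "finding_id" "") rest <;>
          simp [pvLoopFid, pvLoopContent, pvContent_eq, hf, hc, ht, h1]
      · have ht : pvRank (PySem.Dict.getD (⟨fm⟩ : PySem.Dict String String) "finding_id" "") t = 2 := by
          simp [pvRank, hf, hc]
        cases h1 : pvLoopFid (PySem.Dict.getD (⟨fm⟩ : PySem.Dict String String) "finding_id" "") rest <;>
          cases h2 : pvLoopContent rest <;>
            simp [pvLoopFid, pvLoopContent, pvContent_eq, hf, hc, ht, h1, h2]
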